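-- pv_equiv track=rewrite | github.com/mblesel/bibtex-updater-test | bibio/bib_linter.py | lint_entry
-- ===== SOURCE A (Python) =====
-- def lint_entry(entry: dict) -> dict:
--     """lint entry"""
--     preferred_order = ['author', 'title', 'journal', 'booktitle',
--                         'year', 'volume', 'number', 'pages', 'doi', 'url']
--     linted = {k: entry[k] for k in preferred_order if k in entry}
--     for key in sorted(entry):
--         if key not in linted:
--             linted[key] = entry[key]
--     return linted
-- ===== SOURCE B (Python) =====
-- def lint_entry(entry: dict) -> dict:
--     """lint entry"""
--     preferred_order = ['author', 'title', 'journal', 'booktitle',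
--                        'year', 'volume', 'number', 'pages', 'doi', 'url']
--     rank = {k: i for i, k in enumerate(preferred_order)}
--     order = sorted(entry, key=lambda k: (rank.get(k, len(rank)), k))
--     return {k: entry[k] for k in order}
-- ===== Notes on version B (the rewrite author's own statement) =====
-- stated objective: alternative
-- what changed: Replaces A's two-phase construction (comprehension over the preferred list plus a second loop over the sorted remaining keys) with a single sorted() call over all keys using a composite (rank, key) key built from an enumerate-index table, then one dict comprehension.
import Mathlib
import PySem

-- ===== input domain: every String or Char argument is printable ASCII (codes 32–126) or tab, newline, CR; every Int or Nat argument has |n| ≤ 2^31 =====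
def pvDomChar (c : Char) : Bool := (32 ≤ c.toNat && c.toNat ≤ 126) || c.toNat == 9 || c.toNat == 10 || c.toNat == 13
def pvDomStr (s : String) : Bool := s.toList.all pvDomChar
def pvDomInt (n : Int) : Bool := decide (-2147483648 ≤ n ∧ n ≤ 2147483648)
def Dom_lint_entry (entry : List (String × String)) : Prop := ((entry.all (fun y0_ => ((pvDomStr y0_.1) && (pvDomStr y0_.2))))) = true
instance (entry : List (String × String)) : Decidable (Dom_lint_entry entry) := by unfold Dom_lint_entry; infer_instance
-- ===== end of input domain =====

-- B replaces A's two-phase build (preferred-key comprehension + separate sorted-remainder loop)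
-- by one indexed sort of all keys under a composite (rank, key) key; objective: alternative decomposition.


-- the preferred_order literal both Python versions write out
def pvPreferred : List String :=
  ["author", "title", "journal", "booktitle", "year", "volume", "number", "pages", "doi", "url"]

-- ===== PORT A =====
-- A: linted = {k: entry[k] for k in preferred_order if k in entry}; then for key in sorted(entry):
-- if key not in linted: linted[key] = entry[key].  (entry[k] is looked up only when k is in entry,
-- so Dict.getD with a dummy default is exact.)
def lint_entry (entry : List (String × String)) : List (String × String) :=
  let d := PySem.Dict.ofList entry
  let linted := pvPreferred.foldl
      (fun acc k => if d.contains k then acc.insert k (d.getD k "") else acc) PySem.Dict.empty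
  let linted := (PySem.List.sorted d.keys (fun x => x)).foldl
      (fun acc k => if acc.contains k then acc else acc.insert k (d.getD k "")) linted
  linted.items

-- ===== PORT B =====
-- B: rank = {k: i for i, k in enumerate(preferred_order)};
--    order = sorted(entry, key=lambda k: (rank.get(k, len(rank)), k)); return {k: entry[k] for k in order}
def lint_entry_alt (entry : List (String × String)) : List (String × String) :=
  let d := PySem.Dict.ofList entry
  let rank := PySem.Dict.ofList ((PySem.List.enumerate pvPreferred).map (fun p => (p.2, p.1)))
  let order := PySem.List.sorted2 d.keys (fun k => rank.getD k (rank.size : Int)) (fun k => k)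
  order.map (fun k => (k, d.getD k ""))

-- ===== PRECONDITION & SPEC =====
def Spec_lint_entry (entry : List (String × String)) (out : List (String × String)) : Prop := out = lint_entry_alt entry
instance (entry : List (String × String)) (out : List (String × String)) : Decidable (Spec_lint_entry entry out) := by unfold Spec_lint_entry; infer_instance

-- ===== CLAIM (what is proved, stated in full; the proofs are below) =====
def Claim_equal_lint_entry : Prop := ∀ (entry : List (String × String)), Dom_lint_entry entry → Spec_lint_entry entry (lint_entry entry)

-- ===== LEMMAS AND PROOFS =====

-- B's rank dictionary, named for the proofs
def pvRank : PySem.Dict String Int :=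
  PySem.Dict.ofList ((PySem.List.enumerate pvPreferred).map (fun p => (p.2, p.1)))

def pvLexPair (i : Int) (s : String) : Lex (Int × String) := toLex (i, s)

-- the common shape both sides are reduced to: preferred keys present, in preferred order,
-- followed by the alphabetically sorted non-preferred keys, each paired with its value
def pvShape (entry : List (String × String)) : List (String × String) :=
  ((pvPreferred.filter (fun k => (PySem.Dict.ofList entry).contains k)) ++
    ((PySem.List.sorted (PySem.Dict.ofList entry).keys (fun x => x)).filter
      (fun k => !decide (k ∈ pvPreferred)))).map
    (fun k => (k, (PySem.Dict.ofList entry).getD k ""))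

-- A's second loop: inserting only missing keys along a duplicate-free key list
-- is inserting along the keys not already present.
lemma foldl_insert_missing (f : String → String) (sk : List String)
    (init : PySem.Dict String String) (h : sk.Nodup) :
    sk.foldl (fun acc k => if acc.contains k then acc else acc.insert k (f k)) init
      = (sk.filter (fun k => !init.contains k)).foldl (fun acc k => acc.insert k (f k)) init := by
  induction sk generalizing init with
  | nil => rfl
  | cons k t ih =>
    rcases List.nodup_cons.mp h with ⟨hk, ht⟩
    by_cases hc : init.contains k = true
    · simp [List.foldl_cons, hc, ih init ht]
    · have hc' : init.contains k = false := by revert hc; cases init.contains k <;> simp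
      have hfc : t.filter (fun k' => !(init.insert k (f k)).contains k')
          = t.filter (fun k' => !init.contains k') := by
        refine List.filter_congr ?_
        intro x hx
        have hne : x ≠ k := fun hxk => hk (hxk ▸ hx)
        simp [PySem.Dict.contains_insert, hne]
      simp [List.foldl_cons, hc', ih (init.insert k (f k)) ht, hfc]

-- sorted2 with an (Int, String) composite key is sorted under the lexicographic key
lemma sorted2_eq_sorted_lex {α : Type} (xs : List α) (k1 : α → Int) (k2 : α → String) :
    PySem.List.sorted2 xs k1 k2 = PySem.List.sorted xs (fun x => pvLexPair (k1 x) (k2 x)) := by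
  rw [PySem.List.sorted_eq_foldl_insertBy]
  show List.foldl _ [] xs = _
  have hcmp : (fun a b => decide (k1 a < k1 b) || (!decide (k1 b < k1 a) && decide (k2 a < k2 b)))
      = (fun a b : α => decide (pvLexPair (k1 a) (k2 a) < pvLexPair (k1 b) (k2 b))) := by
    funext a b
    rcases lt_trichotomy (k1 a) (k1 b) with h | h | h
    · simp [pvLexPair, Prod.Lex.lt_iff, h]
    · simp [pvLexPair, Prod.Lex.lt_iff, h]
    · have hne : k1 a ≠ k1 b := ne_of_gt h
      simp only [pvLexPair, Prod.Lex.lt_iff]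
      have h1 : ¬ k1 a < k1 b := lt_asymm h
      simp [h1, hne, not_le.mpr h]
  rw [hcmp]
  rfl

-- rank facts about the literal dictionary
lemma pvRank_lt_of_mem : ∀ k ∈ pvPreferred, pvRank.getD k 10 < 10 := by decide

lemma pvRank_pairwise : pvPreferred.Pairwise (fun a b => pvRank.getD a 10 < pvRank.getD b 10) := by decide

lemma pvRank_eq_of_not_mem (k : String) (h : k ∉ pvPreferred) : pvRank.getD k 10 = 10 := by
  have hkeys : pvRank.keys = pvPreferred := by decide
  have hc : pvRank.contains k = false := by
    rw [PySem.Dict.contains_eq_decide_mem_keys, hkeys]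
    simpa using h
  exact PySem.Dict.getD_of_not_contains _ _ hc

lemma pvPreferred_nodup : pvPreferred.Nodup := by decide

-- the composite key, as a function
def pvKeyFun (k : String) : Lex (Int × String) := pvLexPair (pvRank.getD k 10) k

-- A reduces to the common shape
lemma lintA_eq (entry : List (String × String)) : lint_entry entry = pvShape entry := by
  simp only [lint_entry, pvShape]
  set d := PySem.Dict.ofList entry with hd
  have hnd : d.keys.Nodup := PySem.Dict.nodup_keys_ofList entry
  set pf := pvPreferred.filter (fun k => d.contains k) with hpf
  have hpfnd : pf.Nodup := pvPreferred_nodup.filter _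
  set sk := PySem.List.sorted d.keys (fun x => x) with hsk
  have sknd : sk.Nodup := ((PySem.List.sorted_perm d.keys (fun x => x) false).nodup_iff).mpr hnd
  rw [PySem.List.foldl_if_eq_foldl_filter]
  set linted1 := List.foldl (fun acc k => acc.insert k (d.getD k "")) PySem.Dict.empty pf with hl1
  have h1 : linted1.items = pf.map (fun k => (k, d.getD k "")) := by
    have := PySem.Dict.items_foldl_insert_fresh pf (fun k => k) (fun k => d.getD k "")
      PySem.Dict.empty (by intro a _; simp) (by simpa using hpfnd)
    simpa [hl1] using this
  have hcont1 : ∀ x : String, linted1.contains x = decide (x ∈ pf) := by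
    intro x
    rw [PySem.Dict.contains_eq_decide_mem_keys]
    have hkeys1 : linted1.keys = pf := by
      simp only [PySem.Dict.keys, h1, List.map_map]
      exact List.map_id _
    rw [hkeys1]
  rw [foldl_insert_missing _ sk linted1 sknd]
  have hfc : sk.filter (fun k => !linted1.contains k)
      = sk.filter (fun k => !decide (k ∈ pvPreferred)) := by
    refine List.filter_congr ?_
    intro x hx
    have hxk : x ∈ d.keys := ((PySem.List.sorted_perm d.keys (fun x => x) false).mem_iff).mp hx
    have hcx : d.contains x = true := by
      rw [PySem.Dict.contains_eq_decide_mem_keys]; simpa using hxk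
    rw [hcont1]
    by_cases hp : x ∈ pvPreferred
    · simp [hpf, List.mem_filter, hp, hcx]
    · simp [hpf, List.mem_filter, hp]
  rw [hfc]
  set rest := sk.filter (fun k => !decide (k ∈ pvPreferred)) with hrest
  have h2 : (List.foldl (fun acc k => acc.insert k (d.getD k "")) linted1 rest).items
      = linted1.items ++ rest.map (fun k => (k, d.getD k "")) := by
    have := PySem.Dict.items_foldl_insert_fresh rest (fun k => k) (fun k => d.getD k "") linted1
      (by
        intro a ha
        have hp : a ∉ pvPreferred := by
          have := (List.mem_filter.mp ha).2
          simpa using this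
        have hnp : a ∉ pf := fun hin => hp (List.mem_filter.mp hin).1
        rw [hcont1]; simpa using hnp)
      (by simpa using sknd.filter _)
    simpa using this
  rw [h2, h1, ← List.map_append]

-- B reduces to the common shape
lemma lintB_eq (entry : List (String × String)) : lint_entry_alt entry = pvShape entry := by
  simp only [lint_entry_alt, pvShape]
  set d := PySem.Dict.ofList entry with hd
  have hnd : d.keys.Nodup := PySem.Dict.nodup_keys_ofList entry
  set pf := pvPreferred.filter (fun k => d.contains k) with hpf
  have hpfnd : pf.Nodup := pvPreferred_nodup.filter _
  set sk := PySem.List.sorted d.keys (fun x => x) with hsk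
  have sknd : sk.Nodup := ((PySem.List.sorted_perm d.keys (fun x => x) false).nodup_iff).mpr hnd
  set rest := sk.filter (fun k => !decide (k ∈ pvPreferred)) with hrest
  have hrk : PySem.Dict.ofList ((PySem.List.enumerate pvPreferred).map (fun p => (p.2, p.1))) = pvRank := rfl
  have h10 : ((PySem.Dict.size pvRank : Nat) : Int) = 10 := by decide
  rw [hrk, h10, sorted2_eq_sorted_lex]
  have horder : PySem.List.sorted d.keys (fun k => pvLexPair (pvRank.getD k 10) k) = pf ++ rest := by
    apply PySem.List.sorted_eq_of_perm_of_pairwise_lt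
    · -- permutation
      have h1 : pf.Perm (d.keys.filter (fun k => decide (k ∈ pvPreferred))) := by
        rw [List.perm_ext_iff_of_nodup hpfnd (hnd.filter _)]
        intro a
        simp [hpf, List.mem_filter, PySem.Dict.contains_eq_decide_mem_keys, and_comm]
      have h2 : rest.Perm (d.keys.filter (fun k => !decide (k ∈ pvPreferred))) :=
        (PySem.List.sorted_perm d.keys (fun x => x) false).filter _
      exact (h1.append h2).trans (List.filter_append_perm _ d.keys)
    · -- strictly increasing under the composite key
      rw [List.pairwise_append]
      refine ⟨?_, ?_, ?_⟩
      · refine (pvRank_pairwise.filter _).imp ?_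
        intro a b hab
        exact Prod.Lex.lt_iff.mpr (Or.inl hab)
      · have hskpw : sk.Pairwise (fun a b : String => a < b) := by
          have hle : sk.Pairwise (fun a b : String => a ≤ b) :=
            PySem.List.sorted_pairwise d.keys (fun x => x)
          have hne : sk.Pairwise (fun a b : String => a ≠ b) := sknd
          exact (hle.and hne).imp (fun h => lt_of_le_of_ne h.1 h.2)
        refine (hskpw.filter _).imp_of_mem ?_
        intro a b ha hb hab
        have hpa : a ∉ pvPreferred := by simpa using (List.mem_filter.mp ha).2
        have hpb : b ∉ pvPreferred := by simpa using (List.mem_filter.mp hb).2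
        refine Prod.Lex.lt_iff.mpr (Or.inr ⟨?_, ?_⟩)
        · simp [pvLexPair, pvRank_eq_of_not_mem a hpa, pvRank_eq_of_not_mem b hpb]
        · simpa [pvLexPair] using hab
      · intro a ha b hb
        have hpa : a ∈ pvPreferred := (List.mem_filter.mp ha).1
        have hpb : b ∉ pvPreferred := by simpa using (List.mem_filter.mp hb).2
        refine Prod.Lex.lt_iff.mpr (Or.inl ?_)
        show pvRank.getD a 10 < pvRank.getD b 10
        rw [pvRank_eq_of_not_mem b hpb]
        exact pvRank_lt_of_mem a hpa
  rw [horder, List.map_append]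

-- ===== VERDICT =====
theorem lint_entry_spec : Claim_equal_lint_entry := by
  intro entry _
  unfold Spec_lint_entry
  rw [lintA_eq, lintB_eq]
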